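-- pv_equiv track=rewrite | github.com/kimsj-git/Algorithm_Problem-solving | 프로그래머스/3/258707. n ＋ 1 카드게임/n ＋ 1 카드게임.py | solution
-- ===== SOURCE A (Python) =====
-- from itertools import combinations
--
-- def pairs_count(card_list, target_sum):
--     result = 0
--     for pair in combinations(card_list, 2):
--         if sum(pair) == target_sum:
--             result += 1
--     return result
--
-- def solution(coin, cards):
--     n = len(cards)
--
--     my_cards = cards[:n//3] # 내가 가진 카드
--     candidates = []         # 코인을 내고 교환할 수 있는 후보 카드
--
--     my_pairs = pairs_count(my_cards, n + 1) # 내 카드 중 합이 n+1인 페어의 개수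
--     match_my_cards = 0      # 후보 카드 중 내 카드와 합이 n+1인 카드의 개수
--     match_candidates = 0    # 후보 카드 중 합이 n+1인 페어의 개수
--
--     round = 1
--     for i in range(n//3, n, 2):
--         two_cards = cards[i:i+2]
--         candidates += two_cards
--         for card in two_cards:
--             if n + 1 - card in my_cards:
--                 match_my_cards += 1
--             elif n + 1 - card in candidates:
--                 match_candidates += 1
--
--         if my_pairs > 0:
--             my_pairs -= 1
--             round += 1
--         elif match_my_cards > 0 and coin >= 1:
--             match_my_cards -= 1
--             coin -= 1
--             round += 1
--         elif match_candidates > 0 and coin >= 2: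
--             match_candidates -= 1
--             coin -= 2
--             round += 1
--         else:
--             return round
--
--     return round
-- ===== SOURCE B (Python) =====
-- def solution(coin, cards):
--     n = len(cards)
--     target = n + 1
--     k = n // 3
--     mine = cards[:k]
--     my_set = set(mine)
--
--     # pairs among my cards summing to target: one pass with a complement counter
--     my_pairs = 0
--     seen = {}
--     for c in mine:
--         my_pairs += seen.get(target - c, 0)
--         seen[c] = seen.get(c, 0) + 1
--
--     cand = set()
--     match_my = 0
--     match_cand = 0
--     rnd = 1
--     rest = cards[k:]
--     while rest:
--         drawn = rest[:2]
--         rest = rest[2:]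
--         for c in drawn:
--             cand.add(c)
--         for c in drawn:
--             if target - c in my_set:
--                 match_my += 1
--             elif target - c in cand:
--                 match_cand += 1
--         if my_pairs > 0:
--             my_pairs -= 1
--         elif match_my > 0 and coin >= 1:
--             match_my -= 1
--             coin -= 1
--         elif match_cand > 0 and coin >= 2:
--             match_cand -= 1
--             coin -= 2
--         else:
--             return rnd
--         rnd += 1
--     return rnd
-- ===== Notes on version B (the rewrite author's own statement) =====
-- stated objective: faster
-- what changed: B replaces A's quadratic combinations() scan with a one-pass complement-counter (dict) for the initial pair count and replaces the per-round linear list-membership scans (my_cards list, growing candidates list) with set lookups, consuming the drawn cards as two-element chunks instead of index slicing.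
import Mathlib
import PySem

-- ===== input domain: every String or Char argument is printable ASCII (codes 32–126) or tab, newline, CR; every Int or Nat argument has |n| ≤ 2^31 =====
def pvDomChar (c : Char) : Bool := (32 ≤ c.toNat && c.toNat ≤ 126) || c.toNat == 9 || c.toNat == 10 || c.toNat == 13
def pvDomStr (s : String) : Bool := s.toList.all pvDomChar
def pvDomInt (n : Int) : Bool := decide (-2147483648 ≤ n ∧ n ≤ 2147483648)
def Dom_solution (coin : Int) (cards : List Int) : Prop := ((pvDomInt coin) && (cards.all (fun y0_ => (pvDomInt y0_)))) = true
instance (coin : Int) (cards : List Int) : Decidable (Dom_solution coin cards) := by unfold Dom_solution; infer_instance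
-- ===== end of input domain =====

-- B replaces A's quadratic pair scan and per-round list-membership scans by a one-pass
-- complement-counter for the initial pairs and set membership for the simulation; return value only.

-- ===== PORT A =====
-- pairs_count: for pair in combinations(card_list, 2): if sum(pair) == target_sum: result += 1
def pairsCount (cardList : List Int) (targetSum : Int) : Int :=
  match cardList with
  | [] => 0
  | x :: xs => xs.foldl (fun r y => if x + y = targetSum then r + 1 else r) 0 + pairsCount xs targetSum

-- the 'for i in range(n//3, n, 2)' loop of A, with its early 'return round'
def solGo (cards myCards : List Int) (np1 : Int) :
    List Int → List Int → Int → Int → Int → Int → Int → Int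
  | [], _, _, _, _, _, round => round
  | i :: rest, candidates, myPairs, mmc, mc, coin, round =>
    let twoCards := PySem.List.slice cards (some i) (some (i + 2))
    let candidates := candidates ++ twoCards
    let p := twoCards.foldl (fun (p : Int × Int) card =>
        if (np1 - card) ∈ myCards then (p.1 + 1, p.2)
        else if (np1 - card) ∈ candidates then (p.1, p.2 + 1)
        else p) (mmc, mc)
    if myPairs > 0 then
      solGo cards myCards np1 rest candidates (myPairs - 1) p.1 p.2 coin (round + 1)
    else if p.1 > 0 ∧ coin ≥ 1 then
      solGo cards myCards np1 rest candidates myPairs (p.1 - 1) p.2 (coin - 1) (round + 1)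
    else if p.2 > 0 ∧ coin ≥ 2 then
      solGo cards myCards np1 rest candidates myPairs p.1 (p.2 - 1) (coin - 2) (round + 1)
    else round

def solution (coin : Int) (cards : List Int) : Int :=
  let n : Int := PySem.List.len cards
  let myCards := PySem.List.slice cards none (some (PySem.Int.floordiv n 3))
  let myPairs := pairsCount myCards (n + 1)
  solGo cards myCards (n + 1) (PySem.List.pyRange (PySem.Int.floordiv n 3) n 2)
    [] myPairs 0 0 coin 1

-- ===== PORT B =====
-- one-pass complement-counter count of pairs summing to target (Source B's seen-dict loop)
def pairsCountAlt (l : List Int) (target : Int) : Int :=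
  (l.foldl (fun (st : Int × PySem.Dict Int Int) c =>
      (st.1 + st.2.getD (target - c) 0, st.2.insert c (st.2.getD c 0 + 1)))
    (0, PySem.Dict.empty)).1

-- Source B's 'while rest:' loop, consuming the drawn part two cards at a time
def altGo (target : Int) (mySet : PySem.Set Int) :
    List Int → PySem.Set Int → Int → Int → Int → Int → Int → Int
  | [], _, _, _, _, _, rnd => rnd
  | c1 :: rest', cand, myPairs, mm, mc, coin, rnd =>
    let drawn := c1 :: rest'.take 1
    let rest := rest'.drop 1
    let cand := PySem.Set.update cand drawn
    let p := drawn.foldl (fun (p : Int × Int) c =>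
        if (target - c) ∈ mySet then (p.1 + 1, p.2)
        else if (target - c) ∈ cand then (p.1, p.2 + 1)
        else p) (mm, mc)
    if myPairs > 0 then
      altGo target mySet rest cand (myPairs - 1) p.1 p.2 coin (rnd + 1)
    else if p.1 > 0 ∧ coin ≥ 1 then
      altGo target mySet rest cand myPairs (p.1 - 1) p.2 (coin - 1) (rnd + 1)
    else if p.2 > 0 ∧ coin ≥ 2 then
      altGo target mySet rest cand myPairs p.1 (p.2 - 1) (coin - 2) (rnd + 1)
    else rnd
  termination_by l => l.length
  decreasing_by all_goals (simp only [List.length_drop, List.length_cons]; omega)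

def solution_alt (coin : Int) (cards : List Int) : Int :=
  let n : Int := PySem.List.len cards
  let target := n + 1
  let k := PySem.Int.floordiv n 3
  let mine := PySem.List.slice cards none (some k)
  let mySet := PySem.Set.ofList mine
  let myPairs := pairsCountAlt mine target
  let rest := PySem.List.slice cards (some k) none
  altGo target mySet rest PySem.Set.empty myPairs 0 0 coin 1

-- ===== PRECONDITION & SPEC =====
def Spec_solution (coin : Int) (cards : List Int) (out : Int) : Prop := out = solution_alt coin cards
instance (coin : Int) (cards : List Int) (out : Int) : Decidable (Spec_solution coin cards out) := by unfold Spec_solution; infer_instance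

-- ===== CLAIM (what is proved, stated in full; the proofs are below) =====
def Claim_equal_solution : Prop := ∀ (coin : Int) (cards : List Int), Dom_solution coin cards → Spec_solution coin cards (solution coin cards)

-- ===== LEMMAS AND PROOFS =====

-- cross pairs: number of (x, y) with x in seen, y in l (ordered by l), x + y = target
def acrossCnt (target : Int) (seen : List Int) : List Int → Int
  | [] => 0
  | y :: l => (seen.count (target - y) : Int) + acrossCnt target seen l

theorem acrossCnt_nil_seen (target : Int) (l : List Int) : acrossCnt target [] l = 0 := by
  induction l with
  | nil => rfl
  | cons y l ih => simp [acrossCnt, ih]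

theorem acrossCnt_append_singleton (target c : Int) (seen l : List Int) :
    acrossCnt target (seen ++ [c]) l = acrossCnt target seen l + (l.count (target - c) : Int) := by
  induction l with
  | nil => simp [acrossCnt]
  | cons y l ih =>
    simp only [acrossCnt, ih, List.count_append, List.count_cons,
      List.count_nil, beq_iff_eq]
    by_cases h : c = target - y
    · rw [if_pos (by omega), if_pos (by omega)]
      push_cast; ring
    · rw [if_neg (by omega), if_neg (by omega)]
      push_cast; ring

theorem pairsCount_cons (x : Int) (xs : List Int) (t : Int) :
    pairsCount (x :: xs) t = (xs.count (t - x) : Int) + pairsCount xs t := by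
  have h := PySem.List.foldl_count_if (fun y => decide (x + y = t)) xs 0
  simp only [pairsCount]
  rw [show (fun (r : Int) (y : Int) => if x + y = t then r + 1 else r)
        = (fun (r : Int) (y : Int) => if (fun y => decide (x + y = t)) y = true then r + 1 else r) by
      funext r y; simp, h]
  have : List.countP (fun y => decide (x + y = t)) xs = xs.count (t - x) := by
    unfold List.count
    apply List.countP_congr
    intro y _
    simp; omega
  simp [this]

theorem pairsAlt_invariant (target : Int) (l : List Int) :
    ∀ (seen : List Int) (acc : Int),
    (l.foldl (fun (st : Int × PySem.Dict Int Int) c =>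
        (st.1 + st.2.getD (target - c) 0, st.2.insert c (st.2.getD c 0 + 1)))
      (acc, PySem.Dict.counter seen)).1
    = acc + acrossCnt target seen l + pairsCount l target := by
  induction l with
  | nil => intro seen acc; simp [pairsCount, acrossCnt]
  | cons c l ih =>
    intro seen acc
    have hins : (PySem.Dict.counter seen).insert c ((PySem.Dict.counter seen).getD c 0 + 1)
        = PySem.Dict.counter (seen ++ [c]) := by
      rw [PySem.Dict.counter_append_singleton]
      simp [PySem.Dict.modify, PySem.Dict.insert, PySem.Dict.getD, PySem.Dict.get?]
    simp only [List.foldl_cons]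
    rw [hins, ih, PySem.Dict.getD_counter, acrossCnt_append_singleton, pairsCount_cons]
    simp only [acrossCnt]
    ring

theorem pairsAlt_eq (l : List Int) (target : Int) :
    pairsCountAlt l target = pairsCount l target := by
  have h := pairsAlt_invariant target l [] 0
  simpa [pairsCountAlt, acrossCnt_nil_seen] using h

theorem pyRange2_nil (a b : Int) (h : b ≤ a) : PySem.List.pyRange a b 2 = [] := by
  rw [PySem.List.pyRange_of_pos a b (by norm_num)]
  simp [not_lt.mpr h]

theorem pyRange2_cons (a b : Int) (h : a < b) :
    PySem.List.pyRange a b 2 = a :: PySem.List.pyRange (a + 2) b 2 := by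
  rw [PySem.List.pyRange_of_pos a b (by norm_num), PySem.List.pyRange_of_pos (a + 2) b (by norm_num)]
  have hN : ((b - a + 2 - 1) / 2).toNat
      = (if a + 2 < b then ((b - (a + 2) + 2 - 1) / 2).toNat else 0) + 1 := by
    split_ifs <;> omega
  rw [if_pos h, hN, List.range_succ_eq_map]
  simp only [List.map_cons, List.map_map, Nat.cast_zero, mul_zero, add_zero]
  congr 1
  apply List.map_congr_left
  intro k _
  simp [Function.comp]
  ring

-- the main loop correspondence: A's index loop over range(k, n, 2) vs B's chunked 'while rest'
theorem loop_eq (cards mine : List Int) (np1 : Int) (mineS : PySem.Set Int)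
    (hm : ∀ x : Int, x ∈ mineS ↔ x ∈ mine) :
    ∀ (fuel : Nat) (i : Int), 0 ≤ i → (cards.length : Int) - i ≤ fuel →
    ∀ (cand : List Int) (candS : PySem.Set Int), (∀ x : Int, x ∈ candS ↔ x ∈ cand) →
    ∀ (myPairs mm mc coin rnd : Int),
    solGo cards mine np1 (PySem.List.pyRange i cards.length 2) cand myPairs mm mc coin rnd
      = altGo np1 mineS (cards.drop i.toNat) candS myPairs mm mc coin rnd := by
  intro fuel
  induction fuel with
  | zero =>
    intro i hi hfuel cand candS hc myPairs mm mc coin rnd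
    have hge : (cards.length : Int) ≤ i := by omega
    rw [pyRange2_nil _ _ hge, List.drop_eq_nil_of_le (by omega)]
    simp [solGo, altGo]
  | succ fuel ih =>
    intro i hi hfuel cand candS hc myPairs mm mc coin rnd
    by_cases hlt : i < (cards.length : Int)
    · rw [pyRange2_cons _ _ hlt]
      have hidx : i.toNat < cards.length := by omega
      have hdrop : cards.drop i.toNat = cards[i.toNat] :: cards.drop (i.toNat + 1) :=
        List.drop_eq_getElem_cons hidx
      rw [hdrop]
      -- the two drawn chunks coincide
      have hslice : PySem.List.slice cards (some i) (some (i + 2))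
          = (cards.drop i.toNat).take 2 := by
        rw [PySem.List.slice_toNat cards hi (by omega)]
        congr 1
        omega
      have htake : (cards.drop i.toNat).take 2
          = cards[i.toNat] :: (cards.drop (i.toNat + 1)).take 1 := by
        rw [hdrop]; rfl
      have hdrop2 : (cards.drop (i.toNat + 1)).drop 1 = cards.drop (i + 2).toNat := by
        rw [List.drop_drop]
        congr 1
        omega
      simp only [solGo, altGo]
      rw [hslice, htake]
      set drawn := cards[i.toNat] :: (cards.drop (i.toNat + 1)).take 1 with hdrawn
      -- membership of the extended candidate pools coincides
      have hc' : ∀ x : Int, x ∈ PySem.Set.update candS drawn ↔ x ∈ cand ++ drawn := by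
        intro x
        rw [PySem.Set.mem_update, List.mem_append, hc]
      -- the per-card matching folds coincide
      have hfold : drawn.foldl (fun (p : Int × Int) card =>
            if (np1 - card) ∈ mine then (p.1 + 1, p.2)
            else if (np1 - card) ∈ cand ++ drawn then (p.1, p.2 + 1)
            else p) (mm, mc)
          = drawn.foldl (fun (p : Int × Int) c =>
            if (np1 - c) ∈ mineS then (p.1 + 1, p.2)
            else if (np1 - c) ∈ PySem.Set.update candS drawn then (p.1, p.2 + 1)
            else p) (mm, mc) := by
        apply PySem.List.foldl_congr_mem
        intro acc x _
        simp only [hm, hc']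
      rw [← hfold]
      have hrec : ∀ (mp mm' mc' co rn : Int),
          solGo cards mine np1 (PySem.List.pyRange (i + 2) (cards.length : Int) 2)
              (cand ++ drawn) mp mm' mc' co rn
            = altGo np1 mineS ((cards.drop (i.toNat + 1)).take 1 |>.drop 1
                |> fun _ => (cards.drop (i.toNat + 1)).drop 1) (PySem.Set.update candS drawn)
                mp mm' mc' co rn := by
        intro mp mm' mc' co rn
        have h2 := ih (i + 2) (by omega) (by omega) (cand ++ drawn)
          (PySem.Set.update candS drawn) hc' mp mm' mc' co rn
        simpa [hdrop2] using h2
      split_ifs <;> first | exact hrec _ _ _ _ _ | rfl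
    · rw [pyRange2_nil _ _ (by omega), List.drop_eq_nil_of_le (by omega)]
      simp [solGo, altGo]

-- ===== VERDICT (by name: the statement is the Claim_ definition above) =====
theorem solution_spec : Claim_equal_solution := by
  intro coin cards _
  unfold Spec_solution solution solution_alt
  simp only [PySem.List.len_eq]
  have hk0 : 0 ≤ PySem.Int.floordiv (cards.length : Int) 3 := by
    rw [PySem.Int.floordiv_eq_ediv_of_pos (by norm_num)]
    exact Int.ediv_nonneg (by positivity) (by norm_num)
  rw [PySem.List.slice_from cards hk0, pairsAlt_eq]
  exact loop_eq cards _ _ _ (fun x => PySem.Set.mem_ofList _ x) cards.length _ hk0 (by omega)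
    [] PySem.Set.empty (by intro x; simp [PySem.Set.empty]) _ _ _ _ _
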